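-- pv_equiv track=rewrite | github.com/pinformatics/mindfirl | mindfirl/get_pair_file_2.py | trailing_space_symbol
-- ===== SOURCE A (Python) =====
-- def trailing_space_symbol(str):
--     str = list(str)
--     for i in range((len(str) - 1), -1, -1):
--         if str[i] == "_":
--             str[i] = "?"
--         else:
--             break;
--     str = "".join(str)
--     return str
-- ===== SOURCE B (Python) =====
-- def trailing_space_symbol(str):
--     r = str.rstrip('_')
--     return r + '?' * (len(str) - len(r))
-- ===== Notes on version B (the rewrite author's own statement) =====
-- stated objective: simpler
-- what changed: Replaces the backwards index loop with per-character list mutation by measuring the trailing underscore run via rstrip and appending that many question marks in one concatenation.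
import Mathlib
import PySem

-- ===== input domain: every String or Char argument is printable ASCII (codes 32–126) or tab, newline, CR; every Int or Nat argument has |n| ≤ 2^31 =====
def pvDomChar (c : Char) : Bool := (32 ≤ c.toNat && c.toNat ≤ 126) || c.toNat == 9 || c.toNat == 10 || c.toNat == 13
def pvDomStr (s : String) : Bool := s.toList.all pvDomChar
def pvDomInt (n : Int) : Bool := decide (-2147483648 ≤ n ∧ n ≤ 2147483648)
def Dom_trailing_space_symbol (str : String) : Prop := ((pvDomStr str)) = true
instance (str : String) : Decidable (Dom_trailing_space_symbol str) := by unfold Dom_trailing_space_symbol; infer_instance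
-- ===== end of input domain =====

-- B replaces A's backwards mutate-and-break loop by measuring the trailing underscore run (rstrip)
-- and appending that many question marks in one concatenation; objective: simpler.

-- ===== PORT A =====
-- A's loop 'for i in range(len-1, -1, -1): if str[i]=="_": str[i]="?" else: break'
-- ported as a downward recursion on the index (n = i+1), mutating via List.set; break = return.
def trailingLoopA (cs : List Char) : Nat → List Char
  | 0 => cs
  | k + 1 => if cs.getD k ' ' = '_' then trailingLoopA (cs.set k '?') k else cs

def trailing_space_symbol (str : String) : String :=
  String.mk (trailingLoopA str.toList str.toList.length)

-- ===== PORT B =====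
-- r = str.rstrip('_')  (exact: drop the trailing run of '_'); result = r + '?' * (len - len r)
def trailing_space_symbol_alt (str : String) : String :=
  let cs := str.toList
  let r := (cs.reverse.dropWhile (· = '_')).reverse
  String.mk (r ++ List.replicate (cs.length - r.length) '?')

-- ===== PRECONDITION & SPEC =====
def Spec_trailing_space_symbol (str : String) (out : String) : Prop := out = trailing_space_symbol_alt str
instance (str : String) (out : String) : Decidable (Spec_trailing_space_symbol str out) := by unfold Spec_trailing_space_symbol; infer_instance

-- ===== CLAIM (what is proved, stated in full; the proofs are below) =====
def Claim_equal_trailing_space_symbol : Prop := ∀ (str : String), Dom_trailing_space_symbol str → Spec_trailing_space_symbol str (trailing_space_symbol str)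

-- ===== LEMMAS AND PROOFS =====

-- the loop only touches indices < cs.length, so a suffix rides along untouched
theorem trailingLoopA_append (t : List Char) : ∀ (cs : List Char) (n : Nat), n ≤ cs.length →
    trailingLoopA (cs ++ t) n = trailingLoopA cs n ++ t := by
  intro cs n
  induction n generalizing cs with
  | zero => intro _; rfl
  | succ k ih =>
    intro hn
    have hk : k < cs.length := hn
    have hget : (cs ++ t).getD k ' ' = cs.getD k ' ' := by
      simp [List.getD, List.getElem?_append_left hk]
    have hset : (cs ++ t).set k '?' = cs.set k '?' ++ t :=
      List.set_append_left _ _ hk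
    by_cases h : cs.getD k ' ' = '_'
    · simp only [trailingLoopA, hget, hset, if_pos h]
      exact ih _ (by simp [Nat.le_of_lt hk])
    · simp only [trailingLoopA, hget, if_neg h]

theorem trailingLoopA_spec : ∀ (cs : List Char),
    trailingLoopA cs cs.length =
      (cs.reverse.dropWhile (· = '_')).reverse ++
        List.replicate (cs.reverse.takeWhile (· = '_')).length '?' := by
  intro cs
  induction cs using List.reverseRecOn with
  | nil => rfl
  | append_singleton ys c ih =>
    have hget : (ys ++ [c]).getD ys.length ' ' = c := by
      simp [List.getD]
    by_cases h : c = '_'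
    · have hset : (ys ++ [c]).set ys.length '?' = ys ++ ['?'] := by
        rw [List.set_append_right _ _ (Nat.le_refl _)]
        simp
      simp only [List.length_append, List.length_singleton, trailingLoopA, hget, if_pos h, hset]
      rw [trailingLoopA_append ['?'] ys ys.length (Nat.le_refl _), ih]
      simp [h, List.replicate_succ']
    · simp only [List.length_append, List.length_singleton, trailingLoopA, hget, if_neg h]
      simp [h]

theorem drop_take_len (cs : List Char) :
    cs.length - ((cs.reverse.dropWhile (· = '_')).reverse).length
      = (cs.reverse.takeWhile (· = '_')).length := by
  have h := List.takeWhile_append_dropWhile (p := fun c => decide (c = '_')) (l := cs.reverse)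
  have hl : (cs.reverse.takeWhile (· = '_')).length + (cs.reverse.dropWhile (· = '_')).length
      = cs.length := by
    rw [← List.length_append, h, List.length_reverse]
  simp only [List.length_reverse]
  omega

-- ===== VERDICT (by name: the statement is the Claim_ definition above) =====
theorem trailing_space_symbol_spec : Claim_equal_trailing_space_symbol := by
  intro s _
  show _ = _
  simp only [trailing_space_symbol, trailing_space_symbol_alt]
  rw [trailingLoopA_spec, drop_take_len]
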